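-- pv_equiv track=rewrite | github.com/sayansuos/3A-indexation-web | TP3/processing.py | are_positions_successive
-- ===== SOURCE A (Python) =====
-- def are_positions_successive(all_positions: list[list[int]]) -> bool:
--     """
--     Check if a sequence of tokens appears consecutively in the text.
--
--     :param all_positions: A list of position lists, where each inner list contains the indices of a token in the document.
--     :type all_positions: list[list[int]]
--     :return: rue if the tokens form a continuous sequence, False otherwise.
--     :rtype: bool
--     """
--     if not all_positions or not all_positions[0]:
--         return False
--
--     for pos in all_positions[0]:
--         match = True
--         for i in range(1, len(all_positions)):
--             if (pos + i) not in all_positions[i]: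
--                 match = False
--                 break
--         if match:
--             return True
--
--     return False
-- ===== SOURCE B (Python) =====
-- def are_positions_successive(all_positions: list[list[int]]) -> bool:
--     if not all_positions or not all_positions[0]:
--         return False
--     s = set(all_positions[0])
--     for i, positions in enumerate(all_positions[1:], 1):
--         s &= {p - i for p in positions}
--     return len(s) > 0
-- ===== Notes on version B (the rewrite author's own statement) =====
-- stated objective: alternative
-- what changed: Replaces the nested candidate-scan (for each position in the first list, test membership in every later list) by building shifted sets {p - i} per token list and reducing them by set intersection, returning whether the final intersection is non-empty.
import Mathlib
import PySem

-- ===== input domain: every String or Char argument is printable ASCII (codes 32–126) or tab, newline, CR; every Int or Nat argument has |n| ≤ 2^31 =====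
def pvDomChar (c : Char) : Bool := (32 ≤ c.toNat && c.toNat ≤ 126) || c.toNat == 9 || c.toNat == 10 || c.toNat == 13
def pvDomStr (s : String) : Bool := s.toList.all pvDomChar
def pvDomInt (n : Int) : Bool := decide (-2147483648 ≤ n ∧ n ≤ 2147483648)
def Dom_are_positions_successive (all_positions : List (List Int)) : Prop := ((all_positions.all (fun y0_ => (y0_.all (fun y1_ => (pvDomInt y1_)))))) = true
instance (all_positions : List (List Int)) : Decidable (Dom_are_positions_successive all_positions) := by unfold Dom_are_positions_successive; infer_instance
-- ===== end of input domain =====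

-- B replaces A's nested candidate-position scan by intersecting shifted position sets; alternative decomposition, same exact result.

-- ===== PORT A =====
-- Literal port of A: guard, then for each pos in all_positions[0], check every i in range(1, len):
-- (pos + i) in all_positions[i]; early return True on a full match (= List.any / List.all).
def are_positions_successive (all_positions : List (List Int)) : Bool :=
  if all_positions.isEmpty || (PySem.List.pyGetD all_positions 0 []).isEmpty then false
  else
    (PySem.List.pyGetD all_positions 0 []).any (fun pos =>
      (PySem.List.pyRange 1 (all_positions.length : Int) 1).all (fun i =>
        decide ((pos + i) ∈ PySem.List.pyGetD all_positions i [])))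

-- ===== PORT B =====
-- Literal port of Source B: s = set(first); for i, positions in enumerate(rest, 1): s &= {p - i for p in positions};
-- return len(s) > 0.
def are_positions_successive_alt (all_positions : List (List Int)) : Bool :=
  match all_positions with
  | [] => false
  | first :: rest =>
    if first.isEmpty then false
    else
      let s := (PySem.List.enumerate rest 1).foldl
        (fun s ip => PySem.Set.inter s (PySem.Set.ofList (ip.2.map (fun p => p - ip.1))))
        (PySem.Set.ofList first)
      decide (0 < PySem.Set.len s)

-- ===== PRECONDITION & SPEC =====
def Spec_are_positions_successive (all_positions : List (List Int)) (out : Bool) : Prop := out = are_positions_successive_alt all_positions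
instance (all_positions : List (List Int)) (out : Bool) : Decidable (Spec_are_positions_successive all_positions out) := by unfold Spec_are_positions_successive; infer_instance

-- ===== CLAIM (what is proved, stated in full; the proofs are below) =====
def Claim_equal_are_positions_successive : Prop := ∀ (all_positions : List (List Int)), Dom_are_positions_successive all_positions → Spec_are_positions_successive all_positions (are_positions_successive all_positions)

-- ===== LEMMAS AND PROOFS =====

-- membership in an iterated intersection
theorem mem_foldl_inter {α β : Type} [BEq α] [LawfulBEq α] (l : List β) (g : β → List α)
    (s : PySem.Set α) (y : α) :
    (y ∈ l.foldl (fun s b => PySem.Set.inter s (g b)) s) ↔ y ∈ s ∧ ∀ b ∈ l, y ∈ g b := by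
  induction l generalizing s with
  | nil => simp
  | cons b l ih =>
    simp [List.foldl_cons, ih, PySem.Set.mem_inter]
    tauto

theorem alt_true_iff (first : List Int) (rest : List (List Int)) :
    are_positions_successive_alt (first :: rest) = true ↔
      ∃ pos ∈ first, ∀ k : Nat, (h : k < rest.length) → pos + (1 + (k : Int)) ∈ rest[k] := by
  unfold are_positions_successive_alt
  by_cases hf : first.isEmpty
  · simp [hf]
    intro pos hpos
    exact absurd hpos (by simp [List.isEmpty_iff.mp hf])
  · rw [Bool.not_eq_true] at hf
    simp only [hf, Bool.false_eq_true, if_false]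
    have hlen : ∀ (s : PySem.Set Int),
        (0 < PySem.Set.len s) ↔ ∃ y, y ∈ s := by
      intro s
      cases s <;> simp [PySem.Set.len]
    rw [decide_eq_true_iff, hlen]
    constructor
    · rintro ⟨y, hy⟩
      rw [mem_foldl_inter] at hy
      obtain ⟨hy0, hy1⟩ := hy
      refine ⟨y, (PySem.Set.mem_ofList _ _).mp hy0, ?_⟩
      intro k hk
      have := hy1 (1 + (k : Int), rest[k]) ?_
      · rcases List.mem_map.mp ((PySem.Set.mem_ofList _ _).mp this) with ⟨p, hp, hpe⟩
        have : y + (1 + (k : Int)) = p := by omega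
        simpa [this] using hp
      · rw [PySem.List.mem_enumerate_iff]
        exact ⟨k, hk, rfl⟩
    · rintro ⟨pos, hpos, hall⟩
      refine ⟨pos, (mem_foldl_inter _ _ _ _).mpr ⟨(PySem.Set.mem_ofList _ _).mpr hpos, ?_⟩⟩
      intro b hb
      rw [PySem.List.mem_enumerate_iff] at hb
      obtain ⟨k, hk, rfl⟩ := hb
      simp only [PySem.Set.mem_ofList, List.mem_map]
      exact ⟨pos + (1 + (k : Int)), hall k hk, by ring⟩

theorem pyGetD_rest (first : List Int) (rest : List (List Int)) (k : Nat) (hk : k < rest.length) :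
    PySem.List.pyGetD (first :: rest) (1 + (k : Int)) [] = rest[k] := by
  have h : (1 + (k : Int)) = ((k + 1 : Nat) : Int) := by push_cast; ring
  rw [h, PySem.List.pyGetD_natCast]
  simp [List.getD, List.getElem?_eq_getElem hk]

theorem a_true_iff (first : List Int) (rest : List (List Int)) :
    are_positions_successive (first :: rest) = true ↔
      first ≠ [] ∧ ∃ pos ∈ first, ∀ k : Nat, (h : k < rest.length) → pos + (1 + (k : Int)) ∈ rest[k] := by
  unfold are_positions_successive
  by_cases hf : first.isEmpty
  · simp [PySem.List.pyGetD, PySem.List.pyGet?, PySem.List.pyIdx?, List.isEmpty_iff.mp hf]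
  · rw [Bool.not_eq_true] at hf
    have hfirst : PySem.List.pyGetD (first :: rest) 0 [] = first := by
      simp [PySem.List.pyGetD, PySem.List.pyGet?, PySem.List.pyIdx?]
    simp only [List.isEmpty_cons, hfirst, hf, Bool.or_false, Bool.false_eq_true, if_false,
      List.any_eq_true, List.all_eq_true, decide_eq_true_iff]
    constructor
    · rintro ⟨pos, hpos, hall⟩
      refine ⟨List.isEmpty_eq_false_iff.mp hf, pos, hpos, ?_⟩
      intro k hk
      have hi : (1 + (k : Int)) ∈ PySem.List.pyRange 1 ((first :: rest).length : Int) 1 := by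
        rw [PySem.List.mem_pyRange_one]
        constructor
        · omega
        · simp only [List.length_cons]
          push_cast
          omega
      have := hall _ hi
      rwa [pyGetD_rest first rest k hk] at this
    · rintro ⟨-, pos, hpos, hall⟩
      refine ⟨pos, hpos, ?_⟩
      intro i hi
      rw [PySem.List.mem_pyRange_one] at hi
      obtain ⟨h1, h2⟩ := hi
      have hk : ∃ k : Nat, i = 1 + (k : Int) ∧ k < rest.length := by
        refine ⟨(i - 1).toNat, ?_, ?_⟩
        · omega
        · simp only [List.length_cons] at h2; push_cast at h2 ⊢; omega
      obtain ⟨k, rfl, hklt⟩ := hk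
      rw [pyGetD_rest first rest k hklt]
      exact hall k hklt

-- ===== VERDICT (by name: the statement is the Claim_ definition above) =====
theorem are_positions_successive_spec : Claim_equal_are_positions_successive := by
  intro all_positions _
  unfold Spec_are_positions_successive
  match all_positions with
  | [] => rfl
  | first :: rest =>
    cases hA : are_positions_successive (first :: rest) with
    | true =>
      have := (a_true_iff first rest).mp hA
      exact ((alt_true_iff first rest).mpr this.2).symm
    | false =>
      cases hB : are_positions_successive_alt (first :: rest) with
      | false => rfl
      | true =>
        have h := (alt_true_iff first rest).mp hB
        have hne : first ≠ [] := by
          rcases h with ⟨pos, hpos, -⟩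
          intro he; rw [he] at hpos; simp at hpos
        have := (a_true_iff first rest).mpr ⟨hne, h⟩
        rw [this] at hA; exact absurd hA (by simp)
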